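-- pv_equiv track=rewrite | github.com/khanramjan/compiler_design | idenworeg.py | tokenize_and_categorize
-- ===== SOURCE A (Python) =====
-- KEYWORDS = {'int', 'float', 'if', 'else', 'while', 'return'}
--
-- OPERATORS = {'+', '-', '*', '/', '=', '==', '!=', '&&', '||'}
--
-- SEPARATORS = {';', ',', '(', ')', '{', '}'}
--
-- def categorize_token(token):
--     if token in KEYWORDS:
--         return f"{token} (keyword)"
--     elif token in OPERATORS:
--         return f"{token} (operator)"
--     elif token in SEPARATORS:
--         return f"{token} (separator)"
--     elif token.isidentifier() and not token.isdigit():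
--         return f"{token} (identifier)"
--     elif token.isdigit():
--         return f"{token} (integer literal)"
--     elif '.' in token and all(part.isdigit() for part in token.split('.') if part):
--         return f"{token} (floating-point literal)"
--     elif token.startswith('"') and token.endswith('"'):
--         return f"{token} (string literal)"
--     return f"{token} (unknown)"
--
-- def tokenize_and_categorize(input_string):
--     tokens, current_token = [], ""
--     for char in input_string:
--         if char.isspace():
--             if current_token: tokens.append(current_token); current_token = ""
--         elif char in OPERATORS | SEPARATORS:
--             if current_token: tokens.append(current_token); current_token = ""
--             tokens.append(char)
--         else:
--             current_token += char
--     if current_token: tokens.append(current_token)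
--     return [categorize_token(token) for token in tokens]
-- ===== SOURCE B (Python) =====
-- import re
--
-- KEYWORDS = {'int', 'float', 'if', 'else', 'while', 'return'}
-- OPERATORS = {'+', '-', '*', '/', '=', '==', '!=', '&&', '||'}
-- SEPARATORS = {';', ',', '(', ')', '{', '}'}
--
-- def categorize_token(token):
--     if token in KEYWORDS:
--         return f"{token} (keyword)"
--     elif token in OPERATORS:
--         return f"{token} (operator)"
--     elif token in SEPARATORS:
--         return f"{token} (separator)"
--     elif token.isidentifier() and not token.isdigit():
--         return f"{token} (identifier)"
--     elif token.isdigit():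
--         return f"{token} (integer literal)"
--     elif '.' in token and all(part.isdigit() for part in token.split('.') if part):
--         return f"{token} (floating-point literal)"
--     elif token.startswith('"') and token.endswith('"'):
--         return f"{token} (string literal)"
--     return f"{token} (unknown)"
--
-- _TOKEN_RE = re.compile(r'[+\-*/=;,(){}]|[^+\-*/=;,(){}\s]+')
--
-- def tokenize_and_categorize(input_string):
--     return [categorize_token(t) for t in _TOKEN_RE.findall(input_string)]
-- ===== Notes on version B (the rewrite author's own statement) =====
-- stated objective: faster
-- what changed: Replaces A's char-by-char accumulator loop (flush current token on whitespace, flush-and-emit on operator/separator chars) with a single regex tokenizer re.findall(r'[+\-*/=;,(){}]|[^+\-*/=;,(){}\s]+', s) followed by a list comprehension over the unchanged categorizer. Same O(n) pass, but the scanning loop runs inside the C regex engine instead of Python bytecode (measured ~13x at n=262144).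
import Mathlib
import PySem

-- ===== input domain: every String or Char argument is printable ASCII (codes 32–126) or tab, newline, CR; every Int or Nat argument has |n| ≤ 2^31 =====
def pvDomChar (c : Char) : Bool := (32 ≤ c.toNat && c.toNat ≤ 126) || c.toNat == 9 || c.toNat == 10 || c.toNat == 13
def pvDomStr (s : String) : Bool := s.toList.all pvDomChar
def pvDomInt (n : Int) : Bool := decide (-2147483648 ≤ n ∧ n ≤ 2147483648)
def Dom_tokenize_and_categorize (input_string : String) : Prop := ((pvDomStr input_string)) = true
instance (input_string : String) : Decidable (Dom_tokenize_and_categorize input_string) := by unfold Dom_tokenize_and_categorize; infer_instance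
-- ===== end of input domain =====

-- B replaces A's char-by-char accumulator loop with a regex-style tokenizer (one
-- alternation: a break character, or a maximal run of non-break non-space characters)
-- followed by the unchanged categorizer; objective: faster (the scan runs in the regex engine).

-- ===== PORT A =====
-- the three module-level sets (Python sets of strings; ported as lists of their elements)
def pvKeywords : List String := ["int", "float", "if", "else", "while", "return"]
def pvOperators : List String := ["+", "-", "*", "/", "=", "==", "!=", "&&", "||"]
def pvSeparators : List String := [";", ",", "(", ")", "{", "}"]

-- token.isidentifier(): hand-ported; exact on the ASCII domain, where a Python
-- identifier is [A-Za-z_][A-Za-z0-9_]*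
def pvIsIdentifier (token : String) : Bool :=
  match token.toList with
  | [] => false
  | c :: cs => (PySem.Chars.isalpha c || c == '_') && cs.all (fun d => PySem.Chars.isalnum d || d == '_')

-- categorize_token: identical in A and in B (B keeps it unchanged), so defined once here
def categorize_token (token : String) : String :=
  if token ∈ pvKeywords then token ++ " (keyword)"
  else if token ∈ pvOperators then token ++ " (operator)"
  else if token ∈ pvSeparators then token ++ " (separator)"
  else if pvIsIdentifier token && !PySem.Str.strIsdigit token then token ++ " (identifier)"
  else if PySem.Str.strIsdigit token then token ++ " (integer literal)"
  -- token.split('.') with a nonempty separator never raises; split? is some here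
  else if PySem.Str.isIn "." token &&
          (((PySem.Str.split? token ".").getD []).filter (fun part => part ≠ "")).all PySem.Str.strIsdigit then
    token ++ " (floating-point literal)"
  else if PySem.Str.startswith token "\"" && PySem.Str.endswith token "\"" then token ++ " (string literal)"
  else token ++ " (unknown)"

-- char in OPERATORS | SEPARATORS (a 1-character string can only equal the 1-character members)
def pvInOpSep (char : Char) : Bool := decide (String.ofList [char] ∈ pvOperators ++ pvSeparators)

-- the body of A's for-loop, on state (tokens, current_token)
def pvStepA (st : List String × String) (char : Char) : List String × String :=
  if PySem.Chars.isspace char then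
    (if st.2 ≠ "" then (st.1 ++ [st.2], "") else st)
  else if pvInOpSep char then
    ((if st.2 ≠ "" then st.1 ++ [st.2] else st.1) ++ [String.ofList [char]], "")
  else
    (st.1, st.2.push char)

def tokenize_and_categorize (input_string : String) : List String :=
  let st := input_string.toList.foldl pvStepA ([], "")
  let tokens := if st.2 ≠ "" then st.1 ++ [st.2] else st.1
  tokens.map categorize_token

-- ===== PORT B =====
-- the 11 characters of the regex character class [+\-*/=;,(){}]
def pvBreakChar (c : Char) : Bool := decide (c ∈ ['+', '-', '*', '/', '=', ';', ',', '(', ')', '{', '}'])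
-- [^+\-*/=;,(){}\s]
def pvWordChar (c : Char) : Bool := !pvBreakChar c && !PySem.Chars.isspace c

-- re.findall(r'[+\-*/=;,(){}]|[^+\-*/=;,(){}\s]+', s): left-to-right scan; at each
-- position the first alternative matches a break char, the second alternative a maximal
-- run of word chars; at a whitespace char no match starts, so the scan moves on one char.
def pvFindall : List Char → List String
  | [] => []
  | c :: rest =>
    if pvBreakChar c then String.ofList [c] :: pvFindall rest
    else if PySem.Chars.isspace c then pvFindall rest
    else String.ofList (c :: rest.takeWhile pvWordChar) :: pvFindall (rest.dropWhile pvWordChar)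
termination_by l => l.length
decreasing_by
  · simp
  · simp
  · simpa using Nat.lt_succ_of_le (List.length_dropWhile_le pvWordChar rest)

def tokenize_and_categorize_alt (input_string : String) : List String :=
  (pvFindall input_string.toList).map categorize_token

-- ===== PRECONDITION & SPEC =====
def Spec_tokenize_and_categorize (input_string : String) (out : List String) : Prop := out = tokenize_and_categorize_alt input_string
instance (input_string : String) (out : List String) : Decidable (Spec_tokenize_and_categorize input_string out) := by unfold Spec_tokenize_and_categorize; infer_instance

-- ===== CLAIM (what is proved, stated in full; the proofs are below) =====
def Claim_equal_tokenize_and_categorize : Prop := ∀ (input_string : String), Dom_tokenize_and_categorize input_string → Spec_tokenize_and_categorize input_string (tokenize_and_categorize input_string)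

-- ===== LEMMAS AND PROOFS =====

-- A's loop followed by the final flush, as one recursion (proved equal to the foldl below)
def pvLoopA : List Char → List String × String → List String
  | [], st => if st.2 ≠ "" then st.1 ++ [st.2] else st.1
  | c :: cs, st => pvLoopA cs (pvStepA st c)

theorem pvLoopA_eq_foldl (cs : List Char) : ∀ st : List String × String,
    pvLoopA cs st = (let r := cs.foldl pvStepA st; if r.2 ≠ "" then r.1 ++ [r.2] else r.1) := by
  induction cs with
  | nil => intro st; rfl
  | cons c cs ih => intro st; simp only [pvLoopA, List.foldl_cons]; exact ih _

theorem pvPush (l : List Char) (c : Char) : (String.ofList l).push c = String.ofList (l ++ [c]) := by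
  rw [String.ofList_append]; exact String.toByteArray_inj.mp rfl

-- A's membership test `char in OPERATORS | SEPARATORS` is exactly B's character class
theorem pvInOpSep_eq_pvBreakChar (c : Char) : pvInOpSep c = pvBreakChar c := by
  unfold pvInOpSep pvBreakChar pvOperators pvSeparators
  simp only [List.mem_append, List.mem_cons, List.not_mem_nil, or_false, String.ofList_eq,
    decide_eq_decide,
    show ("+" : String).toList = ['+'] from rfl, show ("-" : String).toList = ['-'] from rfl,
    show ("*" : String).toList = ['*'] from rfl, show ("/" : String).toList = ['/'] from rfl,
    show ("=" : String).toList = ['='] from rfl, show ("==" : String).toList = ['=', '='] from rfl,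
    show ("!=" : String).toList = ['!', '='] from rfl, show ("&&" : String).toList = ['&', '&'] from rfl,
    show ("||" : String).toList = ['|', '|'] from rfl, show (";" : String).toList = [';'] from rfl,
    show ("," : String).toList = [','] from rfl, show ("(" : String).toList = ['('] from rfl,
    show (")" : String).toList = [')'] from rfl, show ("{" : String).toList = ['{'] from rfl,
    show ("}" : String).toList = ['}'] from rfl]
  simp
  tauto

theorem pvBreak_not_space (c : Char) (h : pvBreakChar c = true) : PySem.Chars.isspace c = false := by
  unfold pvBreakChar at h
  simp only [decide_eq_true_eq, List.mem_cons, List.not_mem_nil, or_false] at h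
  rcases h with rfl | rfl | rfl | rfl | rfl | rfl | rfl | rfl | rfl | rfl | rfl <;> decide

theorem takeWhile_all_append (p : Char → Bool) (l r : List Char) (h : ∀ c ∈ l, p c = true) :
    (l ++ r).takeWhile p = l ++ r.takeWhile p := by
  induction l with
  | nil => simp
  | cons d ds ih =>
    simp [h d (List.mem_cons_self ..),
      ih (fun c hc => h c (List.mem_cons_of_mem _ hc))]

theorem dropWhile_all_append (p : Char → Bool) (l r : List Char) (h : ∀ c ∈ l, p c = true) :
    (l ++ r).dropWhile p = r.dropWhile p := by
  induction l with
  | nil => simp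
  | cons d ds ih =>
    simp [h d (List.mem_cons_self ..),
      ih (fun c hc => h c (List.mem_cons_of_mem _ hc))]

theorem pvFindall_cons_space (c : Char) (cs : List Char) (h : PySem.Chars.isspace c = true)
    (hb : pvBreakChar c = false) : pvFindall (c :: cs) = pvFindall cs := by
  rw [pvFindall]; simp [h, hb]

theorem pvFindall_cons_break (c : Char) (cs : List Char) (h : pvBreakChar c = true) :
    pvFindall (c :: cs) = String.ofList [c] :: pvFindall cs := by
  rw [pvFindall]; simp [h]

-- the scanner flushes a pending run of word chars when the next char cannot extend it
theorem pvFindall_run (l rest : List Char) (hl : ∀ c ∈ l, pvWordChar c = true)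
    (hr : ∀ c, rest.head? = some c → pvWordChar c = false) :
    pvFindall (l ++ rest) = (if l = [] then [] else [String.ofList l]) ++ pvFindall rest := by
  cases l with
  | nil => simp
  | cons d ds =>
    have hd : pvWordChar d = true := hl d (List.mem_cons_self ..)
    have hds : ∀ c ∈ ds, pvWordChar c = true := fun c hc => hl c (List.mem_cons_of_mem _ hc)
    obtain ⟨hdb, hdsp⟩ : pvBreakChar d = false ∧ PySem.Chars.isspace d = false := by
      unfold pvWordChar at hd
      rcases Bool.and_eq_true .. |>.mp hd with ⟨h1, h2⟩
      exact ⟨by simpa using h1, by simpa using h2⟩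
    have htr : rest.takeWhile pvWordChar = [] := by
      cases rest with
      | nil => rfl
      | cons e es => simp [hr e rfl]
    have hdr : rest.dropWhile pvWordChar = rest := by
      cases rest with
      | nil => rfl
      | cons e es => simp [hr e rfl]
    rw [List.cons_append, pvFindall, if_neg (by simp [hdb]), if_neg (by simp [hdsp])]
    rw [takeWhile_all_append _ _ _ hds, dropWhile_all_append _ _ _ hds, htr, hdr]
    simp

-- loop invariant: A's loop with pending word-run `cur` produces `tokens` followed by
-- B's scan of `cur ++ chars`
theorem pvLoopA_eq_findall (chars : List Char) : ∀ (tokens : List String) (cur : List Char),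
    (∀ c ∈ cur, pvWordChar c = true) →
    pvLoopA chars (tokens, String.ofList cur) = tokens ++ pvFindall (cur ++ chars) := by
  induction chars with
  | nil =>
    intro tokens cur hcur
    have h := pvFindall_run cur [] hcur (by intro c hc; simp at hc)
    simp only [List.append_nil] at h ⊢
    rw [h]
    cases cur with
    | nil => simp [pvLoopA, pvFindall]
    | cons d ds => simp [pvLoopA, pvFindall]
  | cons c cs ih =>
    intro tokens cur hcur
    simp only [pvLoopA]
    by_cases hsp : PySem.Chars.isspace c = true
    · have hbr : pvBreakChar c = false := by
        cases h : pvBreakChar c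
        · rfl
        · rw [pvBreak_not_space c h] at hsp; exact absurd hsp (by simp)
      have hw : pvWordChar c = false := by simp [pvWordChar, hsp]
      have hstep : pvStepA (tokens, String.ofList cur) c =
          ((if cur = [] then tokens else tokens ++ [String.ofList cur]), String.ofList []) := by
        unfold pvStepA
        rw [if_pos hsp]
        cases cur <;> simp
      rw [hstep, ih _ [] (by intro x hx; simp at hx)]
      rw [pvFindall_run cur (c :: cs) hcur
        (by intro e he; simp only [List.head?_cons, Option.some.injEq] at he; rw [← he]; exact hw)]
      rw [pvFindall_cons_space c cs hsp hbr]
      cases cur <;> simp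
    · have hsp' : PySem.Chars.isspace c = false := by
        cases h : PySem.Chars.isspace c
        · rfl
        · exact absurd h hsp
      by_cases hbr : pvBreakChar c = true
      · have hw : pvWordChar c = false := by simp [pvWordChar, hbr]
        have hstep : pvStepA (tokens, String.ofList cur) c =
            ((if cur = [] then tokens else tokens ++ [String.ofList cur]) ++ [String.ofList [c]],
              String.ofList []) := by
          unfold pvStepA
          rw [if_neg hsp, pvInOpSep_eq_pvBreakChar, if_pos hbr]
          cases cur <;> simp
        rw [hstep, ih _ [] (by intro x hx; simp at hx)]
        rw [pvFindall_run cur (c :: cs) hcur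
          (by intro e he; simp only [List.head?_cons, Option.some.injEq] at he; rw [← he]; exact hw)]
        rw [pvFindall_cons_break c cs hbr]
        cases cur <;> simp
      · have hbr' : pvBreakChar c = false := by
          cases h : pvBreakChar c
          · rfl
          · exact absurd h hbr
        have hw : pvWordChar c = true := by simp [pvWordChar, hbr', hsp']
        have hstep : pvStepA (tokens, String.ofList cur) c =
            (tokens, String.ofList (cur ++ [c])) := by
          unfold pvStepA
          rw [if_neg hsp, pvInOpSep_eq_pvBreakChar, if_neg (by simp [hbr']), pvPush]
        rw [hstep, ih tokens (cur ++ [c]) (by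
          intro x hx
          rcases List.mem_append.mp hx with hx | hx
          · exact hcur x hx
          · simp only [List.mem_singleton] at hx; subst hx; exact hw)]
        simp [List.append_assoc]

-- ===== VERDICT (by name: the statement is the Claim_ definition above) =====
theorem tokenize_and_categorize_spec : Claim_equal_tokenize_and_categorize := by
  intro input_string _
  unfold Spec_tokenize_and_categorize tokenize_and_categorize tokenize_and_categorize_alt
  have h := pvLoopA_eq_findall input_string.toList [] []
    (by intro x hx; simp at hx)
  rw [pvLoopA_eq_foldl] at h
  simp only [List.nil_append] at h
  rw [show String.ofList ([] : List Char) = "" from rfl] at h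
  simp only []
  rw [h]
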